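-- pv_equiv track=rewrite | github.com/Ulziibnoo/algorithm-analysis-and-design | Labs/Lab10.py | aggregate_analysis
-- ===== SOURCE A (Python) =====
-- def aggregate_analysis(n):
--     total_cost = 0
--     for i in range(1, n + 1):
--         if (i & (i - 1)) == 0:
--             total_cost += i
--         else:
--             total_cost += 1
--     return total_cost
-- ===== SOURCE B (Python) =====
-- def aggregate_analysis(n):
--     if n < 1:
--         return 0
--     k = n.bit_length()  # how many powers of two do not exceed n
--     return (n - k) + (2 ** k - 1)
-- ===== Notes on version B (the rewrite author's own statement) =====
-- stated objective: faster
-- what changed: Replaced the O(n) loop that adds i at powers of two and 1 elsewhere with the closed form (n - bit_length(n)) + (2**bit_length(n) - 1).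
import Mathlib
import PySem

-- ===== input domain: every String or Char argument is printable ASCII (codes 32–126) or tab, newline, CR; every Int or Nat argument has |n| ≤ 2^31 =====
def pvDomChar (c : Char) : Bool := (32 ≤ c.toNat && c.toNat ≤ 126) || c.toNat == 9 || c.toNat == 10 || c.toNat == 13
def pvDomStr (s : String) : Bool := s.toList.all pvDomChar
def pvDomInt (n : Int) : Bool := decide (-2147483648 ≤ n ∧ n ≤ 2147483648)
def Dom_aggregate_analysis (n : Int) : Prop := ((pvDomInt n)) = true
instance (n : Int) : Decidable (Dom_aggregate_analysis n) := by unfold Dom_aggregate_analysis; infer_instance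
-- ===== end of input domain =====

-- B replaces A's linear loop with the closed form (n - bit_length n) + (2^bit_length n - 1).

-- ===== PORT A =====
def aggregate_analysis (n : Int) : Int :=
  (PySem.List.pyRange 1 (n + 1) 1).foldl
    (fun total_cost i =>
      if PySem.Int.band i (i - 1) = 0 then total_cost + i else total_cost + 1)
    0

-- ===== PORT B =====
def aggregate_analysis_alt (n : Int) : Int :=
  if n < 1 then 0
  else
    let k := PySem.Int.bitLength n
    (n - (k : Int)) + (2 ^ k - 1)

-- ===== PRECONDITION & SPEC =====
def Spec_aggregate_analysis (n : Int) (out : Int) : Prop := out = aggregate_analysis_alt n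
instance (n : Int) (out : Int) : Decidable (Spec_aggregate_analysis n out) := by unfold Spec_aggregate_analysis; infer_instance

-- ===== CLAIM (what is proved, stated in full; the proofs are below) =====
def Claim_equal_aggregate_analysis : Prop := ∀ (n : Int), Dom_aggregate_analysis n → Spec_aggregate_analysis n (aggregate_analysis n)

-- ===== LEMMAS AND PROOFS =====

-- bitLength of a positive natural sandwiched between consecutive powers of two
theorem pvBitLen_char (m k : Nat) (h1 : 2 ^ k ≤ m) (h2 : m < 2 ^ (k + 1)) :
    PySem.Int.bitLength (m : Int) = k + 1 := by
  have hm : (m : Int) ≠ 0 := by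
    have h0 : 0 < m := lt_of_lt_of_le (Nat.two_pow_pos k) h1
    exact_mod_cast h0.ne'
  have hub := PySem.Int.lt_two_pow_bitLength (m : Int)
  have hlb := PySem.Int.two_pow_bitLength_le (m : Int) hm
  rw [Int.natAbs_natCast] at hub hlb
  set L := PySem.Int.bitLength (m : Int) with hL
  have h3 : k < L := by
    have h' : (2:Nat) ^ k < 2 ^ L := lt_of_le_of_lt h1 hub
    exact (Nat.pow_lt_pow_iff_right (by norm_num)).mp h'
  have h4 : L - 1 < k + 1 := by
    have h' : (2:Nat) ^ (L - 1) < 2 ^ (k + 1) := lt_of_le_of_lt hlb h2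
    exact (Nat.pow_lt_pow_iff_right (by norm_num)).mp h'
  omega

-- the loop value agrees with the closed form at every natural bound
theorem pvMain (m : Nat) :
    aggregate_analysis (m : Int) = aggregate_analysis_alt (m : Int) := by
  induction m with
  | zero =>
      simp [aggregate_analysis, aggregate_analysis_alt,
        PySem.List.pyRange_one_eq_nil (by norm_num : (1:Int) ≤ 1)]
  | succ m ih =>
      have hgoal : ((m + 1 : Nat) : Int) = (m : Int) + 1 := by push_cast; ring
      rw [hgoal]
      have hcons : PySem.List.pyRange 1 ((m : Int) + 1 + 1) 1
          = PySem.List.pyRange 1 ((m : Int) + 1) 1 ++ [(m : Int) + 1] :=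
        PySem.List.pyRange_one_succ_right (by omega)
      have hcast : ((m : Int) + 1) - 1 = (m : Int) := by ring
      have hband : PySem.Int.band ((m : Int) + 1) ((m : Int) + 1 - 1)
          = (((m + 1) &&& m : Nat) : Int) := by
        rw [hcast]
        exact_mod_cast PySem.Int.band_natCast (m + 1) m
      have hA : aggregate_analysis ((m : Int) + 1)
          = aggregate_analysis (m : Int)
            + (if ((m + 1) &&& m : Nat) = 0 then (m : Int) + 1 else 1) := by
        show (PySem.List.pyRange 1 ((m : Int) + 1 + 1) 1).foldl _ 0 = _
        rw [hcons, List.foldl_append]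
        simp only [List.foldl, hband, Int.natCast_eq_zero]
        split <;> simp [aggregate_analysis]
      by_cases hp : ((m + 1) &&& m : Nat) = 0
      · -- m+1 is a power of two
        obtain ⟨e, he⟩ : (m + 1).isPowerOfTwo :=
          Nat.ne_zero_and_sub_one_eq_zero_iff_isPowerOfTwo.mp
            ⟨Nat.succ_ne_zero m, by simpa using hp⟩
        have hL1 : PySem.Int.bitLength ((m : Int) + 1) = e + 1 := by
          have h' := pvBitLen_char (m + 1) e (by omega)
            (by rw [he]; exact Nat.pow_lt_pow_succ (by norm_num))
          rw [← h']
          norm_cast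
        rcases Nat.eq_zero_or_pos e with he0 | hepos
        · -- e = 0 : m = 0
          subst he0
          have hm0 : m = 0 := by simpa using he
          subst hm0
          norm_num
          decide
        · -- e ≥ 1 : m = 2^e - 1, so bitLength m = e
          have hmpos : 0 < m := by
            have h2 : 2 ≤ 2 ^ e := by
              calc 2 = 2 ^ 1 := rfl
              _ ≤ 2 ^ e := Nat.pow_le_pow_right (by norm_num) hepos
            omega
          have hLm : PySem.Int.bitLength (m : Int) = (e - 1) + 1 := by
            apply pvBitLen_char m (e - 1)
            · have h' : 2 ^ (e - 1) < 2 ^ e := Nat.pow_lt_pow_right (by norm_num) (by omega)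
              omega
            · have h' : e - 1 + 1 = e := by omega
              rw [h']; omega
          have hLm' : PySem.Int.bitLength (m : Int) = e := by omega
          rw [hA, ih, if_pos hp]
          simp only [aggregate_analysis_alt, if_neg (by omega : ¬ (m : Int) < 1),
            if_neg (by omega : ¬ (m : Int) + 1 < 1), hL1, hLm']
          have hme : (m : Int) = 2 ^ e - 1 := by
            have h' : ((m + 1 : Nat) : Int) = ((2 ^ e : Nat) : Int) := by exact_mod_cast he
            push_cast at h'
            omega
          rw [hme]
          push_cast
          ring
      · -- m+1 is not a power of two : bitLength unchanged
        have hmpos : 0 < m := by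
          rcases Nat.eq_zero_or_pos m with h0 | h0
          · subst h0; exact absurd (by decide : (0 + 1) &&& 0 = 0) hp
          · exact h0
        set L := PySem.Int.bitLength ((m : Int) + 1) with hLdef
        have hub := PySem.Int.lt_two_pow_bitLength ((m : Int) + 1)
        have hlb := PySem.Int.two_pow_bitLength_le ((m : Int) + 1) (by omega)
        have hnab : ((m : Int) + 1).natAbs = m + 1 := by
          rw [← hgoal, Int.natAbs_natCast]
        rw [hnab, ← hLdef] at hub hlb
        have hLpos : 1 ≤ L := by
          by_contra h
          have hL0 : L = 0 := by omega
          rw [hL0] at hub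
          simp at hub
        have hne : m + 1 ≠ 2 ^ (L - 1) := by
          intro h
          exact hp (Nat.ne_zero_and_sub_one_eq_zero_iff_isPowerOfTwo.mpr ⟨L - 1, h⟩).2
        have hLm : PySem.Int.bitLength (m : Int) = (L - 1) + 1 := by
          apply pvBitLen_char m (L - 1)
          · omega
          · have h' : L - 1 + 1 = L := by omega
            rw [h']; omega
        have hL1 : PySem.Int.bitLength ((m : Int) + 1) = L := hLdef.symm
        rw [hA, ih, if_neg hp]
        simp only [aggregate_analysis_alt, if_neg (by omega : ¬ (m : Int) < 1),
          if_neg (by omega : ¬ (m : Int) + 1 < 1), hL1, hLm]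
        have hLL : L - 1 + 1 = L := by omega
        rw [hLL]
        ring

theorem pvNeg (n : Int) (h : n < 1) : aggregate_analysis n = 0 := by
  simp [aggregate_analysis, PySem.List.pyRange_one_eq_nil (by omega : n + 1 ≤ 1)]

-- ===== VERDICT (by name: the statement is the Claim_ definition above) =====
theorem aggregate_analysis_spec : Claim_equal_aggregate_analysis := by
  intro n _
  unfold Spec_aggregate_analysis
  by_cases h : n < 1
  · rw [pvNeg n h, aggregate_analysis_alt, if_pos h]
  · obtain ⟨m, rfl⟩ : ∃ m : Nat, n = (m : Int) := ⟨n.toNat, by omega⟩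
    exact pvMain m
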